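-- pv_equiv track=rewrite | github.com/eeh2434/CMPSC131PYTHON | lab7/lab7.py | popular_letters
-- ===== SOURCE A (Python) =====
-- import itertools
--
-- def get_letters_combinations(alphabet, length):
--   """
--   Given an alphabet such as 'abcde', and a int length n such as 2,
--   returns all n letter combinations from the alphabet in alphabetical
--   order, such as ['ab','ac','ad','ae','bc','bd','be','cd','ce','de']
--   """
--   return list(map(''.join, itertools.combinations(alphabet, length)))
--
-- def uses_all(word, letters):
--   """
--   Return True if every letter in letters appeared in word;
--   return False otherwise.
--   """
--   for c in letters:
--     if c not in word:
--       return False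
--   return True
--
-- def count_words_letters(words, letters):
--   """
--   Return the number of words in the list that used all letters in letters.
--   """
--   count = 0
--   for word in words:
--     if uses_all(word, letters):
--       count += 1
--   return count
--
-- def popular_letters(words, n):
--   """
--   Return the n letter combination from the alphabet such that
--   all the letters in the combination appeared in the most number
--   of words; if there are multiple combinations with the same
--   popularity, return the combination that comes first in
--   alphabetic order.
--   """
--   alphabet = "abcdefghijklmnopqrstuvwxyz"
--   combinations = get_letters_combinations(alphabet, n)
--
--   largest = combinations[0]
--   occur = count_words_letters(words, largest)
--
--   for combo in combinations[1:]:
--     newoccur = count_words_letters(words, combo)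
--     if(newoccur > occur):
--       occur = newoccur
--       largest = combo
--   return largest
-- ===== SOURCE B (Python) =====
-- import itertools
--
-- def popular_letters(words, n):
--   """
--   Build once a counter of each word's distinct-lowercase-letter profile
--   (as a frozenset), then score every n-letter combination by summing the
--   multiplicities of the profiles that contain all its letters; keep the
--   first (alphabetically first) combination that strictly improves the score.
--   """
--   alphabet = "abcdefghijklmnopqrstuvwxyz"
--   freq = {}
--   for word in words:
--     present = frozenset(c for c in alphabet if c in word)
--     freq[present] = freq.get(present, 0) + 1
--   best, bestcount = None, -1
--   for combo in itertools.combinations(alphabet, n):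
--     cnt = 0
--     for p, v in freq.items():
--       if p.issuperset(combo):
--         cnt += v
--     if cnt > bestcount:
--       best, bestcount = ''.join(combo), cnt
--   return best
-- ===== Notes on version B (the rewrite author's own statement) =====
-- stated objective: alternative
-- what changed: Instead of re-scanning the whole word list (word by word, letter by letter) for each of the C(26,n) combinations, B first collapses the words into a counter keyed by each word's distinct-letter profile, then scores each combination by one pass over that counter with a subset test, so duplicate profiles are counted once.
import Mathlib
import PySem

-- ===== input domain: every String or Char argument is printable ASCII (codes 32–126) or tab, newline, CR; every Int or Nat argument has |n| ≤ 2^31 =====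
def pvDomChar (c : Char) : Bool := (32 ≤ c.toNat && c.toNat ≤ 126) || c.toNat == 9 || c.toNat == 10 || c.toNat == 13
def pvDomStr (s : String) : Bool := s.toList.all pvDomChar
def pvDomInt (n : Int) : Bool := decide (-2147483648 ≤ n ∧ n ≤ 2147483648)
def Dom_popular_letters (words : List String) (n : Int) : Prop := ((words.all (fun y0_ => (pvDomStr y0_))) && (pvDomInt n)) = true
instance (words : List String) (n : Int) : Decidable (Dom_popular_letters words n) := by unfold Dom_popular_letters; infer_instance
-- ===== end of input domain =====

-- B replaces A's per-combination rescan of the whole word list by a counter, built once,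
-- keyed by each word's distinct-letter profile; each combination is then scored by one
-- pass over that counter with a subset test.  Combination keys and profiles are kept as
-- List Char in both ports (Python's ''.join applied only on return; a frozenset profile
-- is stored as its canonically ordered letter list, so key equality agrees with Python's).

-- ===== PORT A =====
def pvAlphabet : List Char := "abcdefghijklmnopqrstuvwxyz".toList

-- itertools.combinations(xs, k), in itertools' emission order
def pvCombos : List Char → Nat → List (List Char)
  | _, 0 => [[]]
  | [], _ + 1 => []
  | c :: cs, k + 1 => (pvCombos cs k).map (fun l => c :: l) ++ pvCombos cs (k + 1)

-- uses_all: the early-return for-loop over letters ('c not in word' is char membership)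
def pvUsesAll (word : String) (letters : List Char) : Bool :=
  letters.all (fun c => word.toList.contains c)

-- count_words_letters: the counting loop over words
def pvCountWordsLetters (words : List String) (letters : List Char) : Int :=
  words.foldl (fun count word => if pvUsesAll word letters then count + 1 else count) 0

def popular_letters (words : List String) (n : Int) : String :=
  match pvCombos pvAlphabet n.toNat with
  | [] => ""   -- Python: combinations[0] raises IndexError here; excluded by Pre_
  | largest0 :: rest =>
      String.ofList ((rest.foldl
        (fun (p : List Char × Int) combo =>
          if pvCountWordsLetters words combo > p.2 then (combo, pvCountWordsLetters words combo)
          else p)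
        (largest0, pvCountWordsLetters words largest0)).1)

-- ===== PORT B =====
-- the profile counter: freq[frozenset(c for c in alphabet if c in word)] += 1
def pvFreq (words : List String) : PySem.Dict (List Char) Int :=
  words.foldl (fun d word =>
    d.modify (pvAlphabet.filter (fun c => word.toList.contains c)) 0 (fun v => v + 1))
    PySem.Dict.empty

-- cnt = sum(v for p, v in freq.items() if frozenset(combo) <= p)
def pvComboCount (words : List String) (combo : List Char) : Int :=
  (pvFreq words).items.foldl
    (fun s pv => if combo.all (fun c => pv.1.contains c) then s + pv.2 else s) 0

def popular_letters_alt (words : List String) (n : Int) : String :=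
  -- best = None, bestcount = -1; [] stands in for None (never returned when 0 ≤ n ≤ 26)
  String.ofList (((pvCombos pvAlphabet n.toNat).foldl
    (fun (p : List Char × Int) combo =>
      if pvComboCount words combo > p.2 then (combo, pvComboCount words combo) else p)
    ([], -1)).1)

-- ===== PRECONDITION & SPEC =====
-- Pre_ excludes exactly the inputs where Python A raises: n < 0 (ValueError from
-- itertools.combinations) and n > 26 (IndexError from combinations[0]).
def Pre_popular_letters (words : List String) (n : Int) : Prop := 0 ≤ n ∧ n ≤ 26
instance (words : List String) (n : Int) : Decidable (Pre_popular_letters words n) := by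
  unfold Pre_popular_letters; infer_instance

def pvWitness_popular_letters : List String × Int := (["hello", "world"], 2)

def Spec_popular_letters (words : List String) (n : Int) (out : String) : Prop :=
  out = popular_letters_alt words n
instance (words : List String) (n : Int) (out : String) : Decidable (Spec_popular_letters words n out) := by
  unfold Spec_popular_letters; infer_instance

-- ===== CLAIM (what is proved, stated in full; the proofs are below) =====
def Claim_equal_popular_letters : Prop := ∀ (words : List String) (n : Int),
  Dom_popular_letters words n → Pre_popular_letters words n →
  Spec_popular_letters words n (popular_letters words n)

-- ===== LEMMAS AND PROOFS =====

lemma mem_pvCombos {cs : List Char} {k : Nat} {l : List Char} :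
    l ∈ pvCombos cs k ↔ l.Sublist cs ∧ l.length = k := by
  induction cs generalizing k l with
  | nil =>
    cases k with
    | zero => simp [pvCombos, List.sublist_nil]
    | succ k =>
      simp only [pvCombos, List.not_mem_nil, false_iff]
      rintro ⟨h, hl⟩
      simp [List.sublist_nil.mp h] at hl
  | cons c cs ih =>
    cases k with
    | zero =>
      constructor
      · rintro h
        simp [pvCombos] at h
        simp [h]
      · rintro ⟨_, hl⟩
        simp [pvCombos, List.eq_nil_of_length_eq_zero hl]
    | succ k =>
      simp only [pvCombos, List.mem_append, List.mem_map, ih, List.sublist_cons_iff]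
      constructor
      · rintro (⟨l', ⟨hs, hlen⟩, rfl⟩ | ⟨hs, hlen⟩)
        · exact ⟨Or.inr ⟨l', rfl, hs⟩, by simp [hlen]⟩
        · exact ⟨Or.inl hs, hlen⟩
      · rintro ⟨hs | ⟨r, rfl, hr⟩, hlen⟩
        · exact Or.inr ⟨hs, hlen⟩
        · exact Or.inl ⟨r, ⟨hr, by simpa using hlen⟩, rfl⟩

lemma pvCombos_head {cs : List Char} {k : Nat} (h : k ≤ cs.length) :
    ∃ t, pvCombos cs k = cs.take k :: t := by
  induction cs generalizing k with
  | nil =>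
    cases k with
    | zero => exact ⟨[], rfl⟩
    | succ k => simp at h
  | cons c cs ih =>
    cases k with
    | zero => exact ⟨[], rfl⟩
    | succ k =>
      obtain ⟨t, ht⟩ := ih (Nat.le_of_succ_le_succ (by simpa using h))
      exact ⟨t.map (fun l => c :: l) ++ pvCombos cs (k + 1), by simp [pvCombos, ht]⟩

lemma pvCount_eq_countP (words : List String) (letters : List Char) :
    pvCountWordsLetters words letters = (words.countP (fun w => pvUsesAll w letters) : Int) := by
  unfold pvCountWordsLetters
  rw [PySem.List.foldl_count_if]
  simp

lemma pvCount_nonneg (words : List String) (letters : List Char) :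
    0 ≤ pvCountWordsLetters words letters := by
  rw [pvCount_eq_countP]; positivity

-- a sum of an x-indicator over a nodup list containing x picks out x's term
lemma sum_indicator_nodup {x : List Char} (q : List Char → Bool) :
    ∀ s : List (List Char), s.Nodup → x ∈ s →
    (s.map (fun k => if q k then (if x = k then (1 : Int) else 0) else 0)).sum =
      if q x then 1 else 0 := by
  have hzero : ∀ s : List (List Char), x ∉ s →
      (s.map (fun k => if q k then (if x = k then (1 : Int) else 0) else 0)).sum = 0 := by
    intro s
    induction s with
    | nil => simp
    | cons y t ih =>
      intro hx
      have hxy : x ≠ y := fun h => hx (h ▸ List.mem_cons_self)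
      have hxt : x ∉ t := fun h => hx (List.mem_cons_of_mem _ h)
      simp [ih hxt, hxy]
  intro s
  induction s with
  | nil => simp
  | cons y t ih =>
    intro hnd hx
    have hynt : y ∉ t := (List.nodup_cons.mp hnd).1
    rcases List.mem_cons.mp hx with rfl | hx
    · simp [hzero t hynt]
    · have hxy : x ≠ y := fun h => hynt (h ▸ hx)
      simp [ih (List.nodup_cons.mp hnd).2 hx, hxy]

-- summing counts of a list over any nodup cover of its elements counts a predicate
lemma sum_count_dedup (q : List Char → Bool) :
    ∀ (ps : List (List Char)) (s : List (List Char)), s.Nodup → (∀ x ∈ ps, x ∈ s) →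
    (s.map (fun k => if q k then (ps.count k : Int) else 0)).sum = (ps.countP q : Int) := by
  intro ps
  induction ps with
  | nil => intro s _ _; simp
  | cons x tl ih =>
    intro s hnd hcov
    have hsplit : (s.map (fun k => if q k then ((x :: tl).count k : Int) else 0)) =
        s.map (fun k => (if q k then (tl.count k : Int) else 0) +
          (if q k then (if x = k then (1 : Int) else 0) else 0)) := by
      apply List.map_congr_left
      intro k _
      have : (x :: tl).count k = tl.count k + if x = k then 1 else 0 := by
        rw [List.count_cons]
        simp [beq_iff_eq]
      rw [this]
      by_cases hq : q k = true <;> by_cases hxk : x = k <;> simp [hq, hxk]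
    rw [hsplit, PySem.List.sum_map_add_int,
      ih s hnd (fun y hy => hcov y (List.mem_cons_of_mem _ hy)),
      sum_indicator_nodup q s hnd (hcov x List.mem_cons_self), List.countP_cons]
    by_cases hq : q x = true <;> simp [hq]

-- B's score of a combination is exactly A's count of words using all its letters
lemma pvComboCount_eq (words : List String) {combo : List Char}
    (hs : combo.Sublist pvAlphabet) :
    pvComboCount words combo = pvCountWordsLetters words combo := by
  have hfreq : pvFreq words =
      PySem.Dict.counter (words.map (fun w => pvAlphabet.filter (fun c => w.toList.contains c))) := by
    rw [PySem.Dict.counter_eq_foldl, List.foldl_map]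
    rfl
  unfold pvComboCount
  rw [hfreq, PySem.Dict.items_counter, List.foldl_map]
  have hfun : (fun (s : Int) (k : List Char) =>
      if combo.all (fun c => ((k, ((words.map (fun w => pvAlphabet.filter (fun c => w.toList.contains c))).count k : Int)) : List Char × Int).1.contains c)
      then s + ((words.map (fun w => pvAlphabet.filter (fun c => w.toList.contains c))).count k : Int) else s) =
      (fun (s : Int) (k : List Char) => s +
        (if combo.all (fun c => k.contains c)
         then ((words.map (fun w => pvAlphabet.filter (fun c => w.toList.contains c))).count k : Int) else 0)) := by
    funext s k
    split <;> simp
  rw [hfun, PySem.List.foldl_add, zero_add,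
    sum_count_dedup _ _ _ (PySem.Set.nodup_ofList _)
      (fun x hx => (PySem.Set.mem_ofList _ x).mpr hx),
    List.countP_map, pvCount_eq_countP]
  congr 1
  apply List.countP_congr
  intro w _
  show (combo.all fun c => (pvAlphabet.filter (fun c => w.toList.contains c)).contains c) = true
    ↔ pvUsesAll w combo = true
  unfold pvUsesAll
  simp only [List.all_eq_true, List.contains_iff_mem, List.mem_filter]
  constructor
  · exact fun h c hc => (h c hc).2
  · exact fun h c hc => ⟨hs.subset hc, h c hc⟩

-- ===== VERDICT (by name: the statement is the Claim_ definition above) =====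
theorem popular_letters_spec : Claim_equal_popular_letters := by
  intro words n _ hpre
  obtain ⟨hn0, hn26⟩ := hpre
  unfold Spec_popular_letters
  have hn'le : n.toNat ≤ pvAlphabet.length := by
    have h26 : pvAlphabet.length = 26 := by decide
    omega
  obtain ⟨t, hc⟩ := pvCombos_head hn'le
  have hsubt : ∀ k ∈ t, k.Sublist pvAlphabet := by
    intro k hk
    exact (mem_pvCombos.mp (hc ▸ List.mem_cons_of_mem _ hk)).1
  have hA : popular_letters words n = String.ofList ((t.foldl
      (fun (p : List Char × Int) combo =>
        if pvCountWordsLetters words combo > p.2 then (combo, pvCountWordsLetters words combo)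
        else p)
      (pvAlphabet.take n.toNat, pvCountWordsLetters words (pvAlphabet.take n.toNat))).1) := by
    unfold popular_letters
    rw [hc]
  have hB : popular_letters_alt words n = String.ofList (((pvAlphabet.take n.toNat :: t).foldl
      (fun (p : List Char × Int) combo =>
        if pvComboCount words combo > p.2 then (combo, pvComboCount words combo) else p)
      ([], -1)).1) := by
    unfold popular_letters_alt
    rw [hc]
  rw [hA, hB, List.foldl_cons]
  have h0 : pvComboCount words (pvAlphabet.take n.toNat) =
      pvCountWordsLetters words (pvAlphabet.take n.toNat) :=
    pvComboCount_eq words (List.take_sublist _ _)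
  have hpos : pvComboCount words (pvAlphabet.take n.toNat) > (-1 : Int) := by
    rw [h0]
    exact lt_of_lt_of_le (by norm_num) (pvCount_nonneg words _)
  show _ = String.ofList ((t.foldl
      (fun (p : List Char × Int) combo =>
        if pvComboCount words combo > p.2 then (combo, pvComboCount words combo) else p)
      (if pvComboCount words (pvAlphabet.take n.toNat) > (-1 : Int)
       then (pvAlphabet.take n.toNat, pvComboCount words (pvAlphabet.take n.toNat))
       else ([], -1))).1)
  rw [if_pos hpos, h0]
  have hfold := PySem.List.foldl_congr_mem t
      (fun (p : List Char × Int) combo =>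
        if pvCountWordsLetters words combo > p.2 then (combo, pvCountWordsLetters words combo)
        else p)
      (fun (p : List Char × Int) combo =>
        if pvComboCount words combo > p.2 then (combo, pvComboCount words combo) else p)
      (pvAlphabet.take n.toNat, pvCountWordsLetters words (pvAlphabet.take n.toNat))
      (by intro acc x hx; simp only [pvComboCount_eq words (hsubt x hx)])
  rw [hfold]
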